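-- pv_equiv track=rewrite | github.com/devworx8/axon | axon_core/agent.py | _looks_like_unverified_edit_claim
-- ===== SOURCE A (Python) =====
-- def _looks_like_unverified_edit_claim(text: str) -> bool:
--     """Detect model-written "I edited files" reports that were not backed by tools."""
--     sample = (text or "").strip()
--     if not sample:
--         return False
--     suspicious_markers = (
--         "# TASK:",
--         "# STATUS:",
--         "# CHANGES:",
--         "# METHOD:",
--         "# PROGRESS:",
--         "Files modified:",
--         "Changes made to ",
--         "Backup created",
--         "Do not restart server",
--         "implementation in place",
--         "Fix Applied",
--         "patch applied",
--         "commit when ready",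
--     )
--     return any(marker.lower() in sample.lower() for marker in suspicious_markers)
-- ===== SOURCE B (Python) =====
-- _MARKERS_LOWER = (
--     "# task:",
--     "# status:",
--     "# changes:",
--     "# method:",
--     "# progress:",
--     "files modified:",
--     "changes made to ",
--     "backup created",
--     "do not restart server",
--     "implementation in place",
--     "fix applied",
--     "patch applied",
--     "commit when ready",
-- )
--
--
-- def _looks_like_unverified_edit_claim(text: str) -> bool:
--     """Detect model-written "I edited files" reports that were not backed by tools."""
--     sample = (text or "").strip().lower()
--     if not sample:
--         return False
--     # single position-major scan: at each index, test whether some marker starts there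
--     for i in range(len(sample)):
--         for marker in _MARKERS_LOWER:
--             if sample.startswith(marker, i):
--                 return True
--     return False
-- ===== Notes on version B (the rewrite author's own statement) =====
-- stated objective: alternative
-- what changed: B lowercases the stripped text once and does a single position-major scan (at each index, test whether some pre-lowered marker starts there), instead of A's marker-major pass that re-lowercases the whole text and rescans it for every marker.
import Mathlib
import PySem

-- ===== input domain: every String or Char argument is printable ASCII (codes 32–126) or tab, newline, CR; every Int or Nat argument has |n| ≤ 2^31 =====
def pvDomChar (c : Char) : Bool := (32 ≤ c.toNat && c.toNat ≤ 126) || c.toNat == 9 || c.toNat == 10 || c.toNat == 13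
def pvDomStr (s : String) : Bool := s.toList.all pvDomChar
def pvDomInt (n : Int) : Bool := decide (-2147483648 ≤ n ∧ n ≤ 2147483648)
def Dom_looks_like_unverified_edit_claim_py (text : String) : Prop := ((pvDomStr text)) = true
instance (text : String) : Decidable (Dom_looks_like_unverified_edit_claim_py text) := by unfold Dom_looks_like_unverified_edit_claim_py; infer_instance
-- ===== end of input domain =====

-- B lowercases the stripped text once and scans positions (any marker starting at each index)
-- instead of A's per-marker lowercase-and-substring passes; same results, alternative structure.


-- ===== PORT A =====
def pvMarkers : List String :=
  ["# TASK:", "# STATUS:", "# CHANGES:", "# METHOD:", "# PROGRESS:",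
   "Files modified:", "Changes made to ", "Backup created", "Do not restart server",
   "implementation in place", "Fix Applied", "patch applied", "commit when ready"]

def looks_like_unverified_edit_claim_py (text : String) : Bool :=
  let sample := PySem.Str.strip text
  if sample == "" then false
  else pvMarkers.any (fun m => PySem.Str.isIn (PySem.Str.lower m) (PySem.Str.lower sample))

-- ===== PORT B =====
def pvMarkersLower : List (List Char) :=
  ["# task:".toList, "# status:".toList, "# changes:".toList, "# method:".toList,
   "# progress:".toList, "files modified:".toList, "changes made to ".toList,
   "backup created".toList, "do not restart server".toList,
   "implementation in place".toList, "fix applied".toList, "patch applied".toList,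
   "commit when ready".toList]

-- the position-major scan: at each suffix, test whether some marker is a prefix there
def pvAltGo (cs : List Char) : Bool :=
  match cs with
  | [] => false
  | c :: rest =>
    if pvMarkersLower.any (fun m => PySem.Chars.startswith (c :: rest) m) then true
    else pvAltGo rest

def looks_like_unverified_edit_claim_py_alt (text : String) : Bool :=
  let sample := PySem.Chars.lower (PySem.Chars.strip text.toList)
  if sample.isEmpty then false else pvAltGo sample

-- ===== PRECONDITION & SPEC =====
def Spec_looks_like_unverified_edit_claim_py (text : String) (out : Bool) : Prop := out = looks_like_unverified_edit_claim_py_alt text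
instance (text : String) (out : Bool) : Decidable (Spec_looks_like_unverified_edit_claim_py text out) := by unfold Spec_looks_like_unverified_edit_claim_py; infer_instance

-- ===== CLAIM (what is proved, stated in full; the proofs are below) =====
def Claim_equal_looks_like_unverified_edit_claim_py : Prop := ∀ (text : String), Dom_looks_like_unverified_edit_claim_py text → Spec_looks_like_unverified_edit_claim_py text (looks_like_unverified_edit_claim_py text)

-- ===== LEMMAS AND PROOFS =====

-- every lowered marker is nonempty
lemma pvMarkersLower_ne_nil : ∀ m ∈ pvMarkersLower, m ≠ [] := by decide

-- the scan computes "some marker is an infix"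
lemma pvAltGo_eq (cs : List Char) :
    pvAltGo cs = decide (∃ m ∈ pvMarkersLower, m <:+: cs) := by
  induction cs with
  | nil =>
    simp only [pvAltGo]
    symm
    simp only [decide_eq_false_iff_not]
    rintro ⟨m, hm, h⟩
    exact pvMarkersLower_ne_nil m hm (List.infix_nil.mp h)
  | cons c rest ih =>
    simp only [pvAltGo, ih]
    by_cases h : ∃ m ∈ pvMarkersLower, m <+: c :: rest
    · have hany : pvMarkersLower.any (fun m => PySem.Chars.startswith (c :: rest) m) = true := by
        obtain ⟨m, hm, hp⟩ := h
        exact List.any_eq_true.mpr ⟨m, hm, (PySem.Chars.startswith_iff _ _).mpr hp⟩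
      obtain ⟨m, hm, hp⟩ := h
      simp only [hany, if_true]
      exact (decide_eq_true ⟨m, hm, hp.isInfix⟩).symm
    · have hany : pvMarkersLower.any (fun m => PySem.Chars.startswith (c :: rest) m) = false := by
        apply List.any_eq_false.mpr
        intro m hm
        simp only [Bool.not_eq_true]
        by_contra hb
        exact h ⟨m, hm, (PySem.Chars.startswith_iff _ _).mp (by simpa using hb)⟩
      simp only [hany, Bool.false_eq_true, if_false, decide_eq_decide]
      constructor
      · rintro ⟨m, hm, hinf⟩
        exact ⟨m, hm, hinf.trans (List.suffix_cons c rest).isInfix⟩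
      · rintro ⟨m, hm, hinf⟩
        rcases List.infix_cons_iff.mp hinf with hp | ht
        · exact absurd ⟨m, hm, hp⟩ h
        · exact ⟨m, hm, ht⟩

-- lowered markers are the lowercase of A's markers
lemma pvMarkersLower_eq : pvMarkersLower = pvMarkers.map (fun m => PySem.Chars.lower m.toList) := by decide

-- no marker is an infix of the empty text
lemma pvNoMarkerInNil : ¬ ∃ m ∈ pvMarkersLower, m <:+: ([] : List Char) := by
  rintro ⟨m, hm, h⟩
  exact pvMarkersLower_ne_nil m hm (List.infix_nil.mp h)

-- B's port computes "some lowered marker is an infix of the lowered stripped text"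
lemma alt_iff (text : String) :
    looks_like_unverified_edit_claim_py_alt text = true ↔
      ∃ m ∈ pvMarkersLower, m <:+: PySem.Chars.lower (PySem.Chars.strip text.toList) := by
  unfold looks_like_unverified_edit_claim_py_alt
  by_cases hE : (PySem.Chars.lower (PySem.Chars.strip text.toList)).isEmpty = true
  · rw [if_pos hE]
    rw [List.isEmpty_iff.mp hE]
    simp only [Bool.false_eq_true, false_iff]
    exact pvNoMarkerInNil
  · rw [if_neg hE, pvAltGo_eq]
    exact decide_eq_true_iff

-- A's port computes the same proposition
lemma a_iff (text : String) :
    looks_like_unverified_edit_claim_py text = true ↔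
      ∃ m ∈ pvMarkersLower, m <:+: PySem.Chars.lower (PySem.Chars.strip text.toList) := by
  unfold looks_like_unverified_edit_claim_py
  by_cases hlen : (PySem.Str.strip text == "") = true
  · rw [if_pos hlen]
    have hnil : PySem.Chars.strip text.toList = [] := by
      rw [← PySem.Str.toList_strip, eq_of_beq hlen]
      rfl
    rw [hnil]
    have hLnil : PySem.Chars.lower ([] : List Char) = [] := rfl
    rw [hLnil]
    simp only [Bool.false_eq_true, false_iff]
    exact pvNoMarkerInNil
  · rw [if_neg hlen, List.any_eq_true, pvMarkersLower_eq]
    simp only [List.mem_map]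
    constructor
    · rintro ⟨m, hm, hin⟩
      refine ⟨PySem.Chars.lower m.toList, ⟨m, hm, rfl⟩, ?_⟩
      have hinf := (PySem.Str.isIn_iff_infix _ _).mp hin
      simpa [PySem.Str.toList_lower, PySem.Str.toList_strip] using hinf
    · rintro ⟨_, ⟨m, hm, rfl⟩, hinf⟩
      refine ⟨m, hm, ?_⟩
      rw [PySem.Str.isIn_iff_infix]
      simpa [PySem.Str.toList_lower, PySem.Str.toList_strip] using hinf

-- ===== VERDICT (by name: the statement is the Claim_ definition above) =====
theorem looks_like_unverified_edit_claim_py_spec : Claim_equal_looks_like_unverified_edit_claim_py := by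
  intro text _
  unfold Spec_looks_like_unverified_edit_claim_py
  rw [Bool.eq_iff_iff, a_iff, alt_iff]
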